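-- pv_equiv track=rewrite | github.com/citReyJoshua/assignment_statement_lexical_analyzer | lexical_analyzer/finite_state_machines.py | semicolon
-- ===== SOURCE A (Python) =====
-- def semicolon(string_input, largest_match_count, index, length):
--     i = index[0]
--     state = 0
--
--     table = [
--         (1, 2),
--         (2, 2),
--         (2, 2),
--     ]
--
--     while i != length:
--         if string_input[i] == ';':
--             input = 0
--         else:
--             input = 1
--
--         state = table[state][input]
--         if state == 2:
--             break
--
--         i += 1
--
--     if i > largest_match_count[0]:
--         largest_match_count[0] = i
--
--     return i
-- ===== SOURCE B (Python) =====
-- def semicolon(string_input, largest_match_count, index, length):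
--     # The FSM accepts exactly one ';' at the current position: replace the
--     # transition-table loop by a single direct check.
--     i = index[0]
--     if i != length and string_input[i] == ';':
--         i += 1
--     if i > largest_match_count[0]:
--         largest_match_count[0] = i
--     return i
-- ===== Notes on version B (the rewrite author's own statement) =====
-- stated objective: simpler
-- what changed: Replaces A's while-loop over a 3-state transition table with a single closed-form conditional (the FSM can only consume one ';' before halting), keeping the largest_match_count mutation.
-- outside the precondition, e.g. on semicolon(';', [0], [0], 5): A raises IndexError, B returns 1
-- crash fix: When index[0] points at a ';' at the very last valid position and index[0]+1 != length, A's second loop iteration indexes past the string and raises IndexError, while B returns index[0]+1; Pre_ excludes these inputs. — e.g. on semicolon(";", [0], [0], 5): A raises IndexError, B returns 1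
import Mathlib
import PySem

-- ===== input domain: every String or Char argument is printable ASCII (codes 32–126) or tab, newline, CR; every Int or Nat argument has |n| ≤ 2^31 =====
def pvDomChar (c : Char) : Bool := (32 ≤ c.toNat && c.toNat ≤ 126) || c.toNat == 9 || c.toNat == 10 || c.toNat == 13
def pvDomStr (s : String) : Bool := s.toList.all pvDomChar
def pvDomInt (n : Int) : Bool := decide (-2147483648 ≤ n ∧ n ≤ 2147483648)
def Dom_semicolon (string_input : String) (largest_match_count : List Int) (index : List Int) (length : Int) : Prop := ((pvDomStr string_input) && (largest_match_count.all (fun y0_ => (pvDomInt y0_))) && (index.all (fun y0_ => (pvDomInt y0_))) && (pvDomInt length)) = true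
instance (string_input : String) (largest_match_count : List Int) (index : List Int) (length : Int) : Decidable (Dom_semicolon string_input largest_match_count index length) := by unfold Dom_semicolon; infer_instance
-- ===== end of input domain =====

-- B replaces A's transition-table while-loop by one closed-form conditional (same O(1) cost, simpler);
-- both Pythons mutate largest_match_count[0] identically — the theorems below are about the RETURN value only.

-- ===== PORT A =====
def semTable : List (Int × Int) := [(1, 2), (2, 2), (2, 2)]

-- A's while-loop. Fuel 2 strictly exceeds the loop's possible recursion depth: the first
-- iteration either breaks or recurses with state 1, and from state 1 every transition is 2
-- (break), so the recursive call never recurses again; the fuel-0 case is unreachable.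
def semLoop (s : String) (len : Int) : Nat → Int → Int → Option Int
  | 0, i, _ => some i
  | fuel + 1, i, state =>
    if i = len then some i
    else
      match PySem.Str.pyGet? s i with
      | none => none      -- IndexError
      | some c =>
        let inp : Int := if c = ';' then 0 else 1
        match PySem.List.pyGet? semTable state with
        | none => none    -- IndexError (never reached: state ∈ {0,1,2})
        | some row =>
          let state' := if inp = 0 then row.1 else row.2
          if state' = 2 then some i
          else semLoop s len fuel (i + 1) state'

def semicolon (string_input : String) (largest_match_count : List Int) (index : List Int) (length : Int) : Int :=
  match PySem.List.pyGet? index 0 with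
  | none => 0             -- IndexError, excluded by Pre_
  | some i0 =>
    match semLoop string_input length 2 i0 0 with
    | none => 0           -- IndexError, excluded by Pre_
    | some i =>
      match PySem.List.pyGet? largest_match_count 0 with
      | none => 0         -- IndexError, excluded by Pre_
      | some _ => i       -- the list mutation does not affect the return value

-- ===== PORT B =====
def semicolon_alt (string_input : String) (largest_match_count : List Int) (index : List Int) (length : Int) : Int :=
  match PySem.List.pyGet? index 0 with
  | none => 0             -- IndexError, excluded by Pre_
  | some i0 =>
    let step : Option Int :=
      if i0 = length then some i0
      else
        match PySem.Str.pyGet? string_input i0 with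
        | none => none    -- IndexError
        | some c => some (if c = ';' then i0 + 1 else i0)
    match step with
    | none => 0           -- IndexError, excluded by Pre_
    | some i =>
      match PySem.List.pyGet? largest_match_count 0 with
      | none => 0         -- IndexError, excluded by Pre_
      | some _ => i

-- ===== PRECONDITION & SPEC =====
-- Pre_ excludes exactly the inputs where the Python A raises IndexError: empty index or
-- largest_match_count, index[0] out of range (and ≠ length), and the second-iteration access
-- at index[0]+1 after a ';' match when index[0]+1 is out of range (and ≠ length).
def Pre_semicolon (string_input : String) (largest_match_count : List Int) (index : List Int) (length : Int) : Prop :=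
  index ≠ [] ∧ largest_match_count ≠ [] ∧
  (index.headI = length ∨ PySem.Raise.InRange string_input.toList.length index.headI) ∧
  ((index.headI ≠ length ∧ PySem.Str.pyGet? string_input index.headI = some ';' ∧ index.headI + 1 ≠ length)
    → PySem.Raise.InRange string_input.toList.length (index.headI + 1))
instance (string_input : String) (largest_match_count : List Int) (index : List Int) (length : Int) : Decidable (Pre_semicolon string_input largest_match_count index length) := by unfold Pre_semicolon; infer_instance

def pvWitness_semicolon : String × List Int × List Int × Int := (";a", [0], [0], 2)

-- A raises IndexError (second loop iteration reads string_input[index[0]+1]) where B returns index[0]+1.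
def Raises_semicolon (string_input : String) (largest_match_count : List Int) (index : List Int) (length : Int) : Prop :=
  index ≠ [] ∧ largest_match_count ≠ [] ∧
  index.headI ≠ length ∧ PySem.Raise.InRange string_input.toList.length index.headI ∧
  PySem.Str.pyGet? string_input index.headI = some ';' ∧ index.headI + 1 ≠ length ∧
  ¬ PySem.Raise.InRange string_input.toList.length (index.headI + 1)
instance (string_input : String) (largest_match_count : List Int) (index : List Int) (length : Int) : Decidable (Raises_semicolon string_input largest_match_count index length) := by unfold Raises_semicolon; infer_instance

def pvRaiseWitness_semicolon : String × List Int × List Int × Int := (";", [0], [0], 5)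
def pvRaiseWitnessOut_semicolon : Int := 1

def Spec_semicolon (string_input : String) (largest_match_count : List Int) (index : List Int) (length : Int) (out : Int) : Prop := out = semicolon_alt string_input largest_match_count index length
instance (string_input : String) (largest_match_count : List Int) (index : List Int) (length : Int) (out : Int) : Decidable (Spec_semicolon string_input largest_match_count index length out) := by unfold Spec_semicolon; infer_instance

-- ===== CLAIM (what is proved, stated in full; the proofs are below) =====
def Claim_equal_semicolon : Prop := ∀ (string_input : String) (largest_match_count : List Int) (index : List Int) (length : Int), Dom_semicolon string_input largest_match_count index length → Pre_semicolon string_input largest_match_count index length → Spec_semicolon string_input largest_match_count index length (semicolon string_input largest_match_count index length)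
def Claim_raises_semicolon : Prop := (∀ (string_input : String) (largest_match_count : List Int) (index : List Int) (length : Int), Dom_semicolon string_input largest_match_count index length → Raises_semicolon string_input largest_match_count index length → ¬ Pre_semicolon string_input largest_match_count index length) ∧ (Dom_semicolon (pvRaiseWitness_semicolon.1) (pvRaiseWitness_semicolon.2.1) (pvRaiseWitness_semicolon.2.2.1) (pvRaiseWitness_semicolon.2.2.2) ∧ Raises_semicolon (pvRaiseWitness_semicolon.1) (pvRaiseWitness_semicolon.2.1) (pvRaiseWitness_semicolon.2.2.1) (pvRaiseWitness_semicolon.2.2.2) ∧ semicolon_alt (pvRaiseWitness_semicolon.1) (pvRaiseWitness_semicolon.2.1) (pvRaiseWitness_semicolon.2.2.1) (pvRaiseWitness_semicolon.2.2.2) = pvRaiseWitnessOut_semicolon)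

-- ===== LEMMAS AND PROOFS =====

-- ===== VERDICT (by name: the statement is the Claim_ definition above) =====
theorem semicolon_spec : Claim_equal_semicolon := by
  intro s lmc idx len _ hpre
  obtain ⟨hidx, hlmc, hin, hnext⟩ := hpre
  match idx, lmc with
  | x :: idx', m :: lmc' =>
    simp only [List.headI] at hin hnext
    unfold Spec_semicolon semicolon semicolon_alt
    rw [PySem.List.pyGet?_zero_cons, PySem.List.pyGet?_zero_cons]
    by_cases hlen : x = len
    · simp [semLoop, hlen]
    · rcases hc : PySem.List.pyGet? s.toList x with _ | c
      · exfalso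
        rcases hin with h | h
        · exact hlen h
        · rw [PySem.List.pyGet?_eq_none_iff] at hc
          exact hc h
      · by_cases hsc : c = ';'
        · by_cases h1 : x + 1 = len
          · simp [semLoop, hlen, hc, h1, hsc, semTable]
          · have h2 : PySem.Raise.InRange s.toList.length (x + 1) :=
              hnext ⟨hlen, by
                rw [PySem.Str.pyGet?_eq, PySem.Chars.pyGet?_eq_listPyGet?, hc, hsc], h1⟩
            rcases hc2 : PySem.List.pyGet? s.toList (x + 1) with _ | c2
            · exfalso
              rw [PySem.List.pyGet?_eq_none_iff] at hc2
              exact hc2 h2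
            · simp [semLoop, hlen, hc, h1, hc2, hsc, semTable]
        · simp [semLoop, hlen, hc, hsc, semTable]

theorem semicolon_raises : Claim_raises_semicolon := by
  unfold Claim_raises_semicolon
  refine ⟨?_, by decide⟩
  intro s lmc idx len _ hr hpre
  obtain ⟨_, _, hlen, _, hch, h1, hnot⟩ := hr
  exact hnot (hpre.2.2.2 ⟨hlen, hch, h1⟩)

-- self-check: the crash-fix witness value certified by semicolon_raises is pvRaiseWitnessOut_semicolon
theorem pvRaiseWitness_ok : semicolon_alt (pvRaiseWitness_semicolon.1) (pvRaiseWitness_semicolon.2.1) (pvRaiseWitness_semicolon.2.2.1) (pvRaiseWitness_semicolon.2.2.2) = pvRaiseWitnessOut_semicolon := by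
  have h := semicolon_raises
  unfold Claim_raises_semicolon at h
  exact h.2.2.2
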